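-- pv_equiv track=rewrite | github.com/thorkwon/my-scripts | translate2ko_srt.py | write_text
-- ===== SOURCE A (Python) =====
-- def write_text(dests, text, i):
-- 	text_len = len(text)
-- 	while i < text_len:
-- 		dests.append(text[i])
-- 		i += 1
-- 		if i < text_len and text[i] == "\n":
-- 			i += 1
-- 			break
--
-- 	return i
-- ===== SOURCE B (Python) =====
-- def write_text(dests, text, i):
--     n = len(text)
--     if i >= n:
--         return i
--     rest = text[i + 1:]
--     if "\n" in rest:
--         j = i + 1 + rest.index("\n")
--         dests.extend(text[i:j])
--         return j + 1
--     dests.extend(text[i:])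
--     return n
-- ===== Notes on version B (the rewrite author's own statement) =====
-- stated objective: simpler
-- what changed: A's while loop appends elements one by one while re-testing the break condition each step; B locates the first newline strictly after i with a single index search on the slice text[i+1:], then extends dests with one slice and returns j+1 (or len(text) when there is no newline).
-- outside the precondition, e.g. on write_text([], ['\n', 'a'], -2): A returns 1, B returns 2
import Mathlib
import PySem

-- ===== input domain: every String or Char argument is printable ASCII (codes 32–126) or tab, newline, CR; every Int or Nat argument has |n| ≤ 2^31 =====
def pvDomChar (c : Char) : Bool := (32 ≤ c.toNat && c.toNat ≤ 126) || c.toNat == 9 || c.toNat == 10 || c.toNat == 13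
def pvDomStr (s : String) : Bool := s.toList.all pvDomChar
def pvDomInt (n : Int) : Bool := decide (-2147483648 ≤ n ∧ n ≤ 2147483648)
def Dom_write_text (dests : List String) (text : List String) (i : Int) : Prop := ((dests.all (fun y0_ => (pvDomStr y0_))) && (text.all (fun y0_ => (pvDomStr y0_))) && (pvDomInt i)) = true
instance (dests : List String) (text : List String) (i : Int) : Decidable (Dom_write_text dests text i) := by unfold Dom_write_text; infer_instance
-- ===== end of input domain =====

-- B replaces A's element-by-element scan-and-append loop with a single search for the
-- first newline after i and one slice; objective: simpler/idiomatic, same cost.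
-- A mutates dests (appends the copied elements); B performs the same mutation on the
-- admitted inputs (0 ≤ i); the equivalence proved here is about the return value.

-- ===== PORT A =====
-- the while loop of A, threading only the cursor i (dests.append has no effect on the return value)
def write_text_go (text : List String) (n : Int) (i : Int) : Int :=
  if _h : i < n then
    -- dests.append(text[i]); i += 1; then test text[i] == "\n"
    if i + 1 < n ∧ PySem.List.pyGet? text (i + 1) = some "\n" then
      (i + 1) + 1                  -- i += 1; break
    else
      write_text_go text n (i + 1)
  else i
termination_by (n - i).toNat
decreasing_by omega

def write_text (dests : List String) (text : List String) (i : Int) : Int :=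
  write_text_go text (text.length : Int) i

-- ===== PORT B =====
def write_text_alt (dests : List String) (text : List String) (i : Int) : Int :=
  let n : Int := text.length
  if n ≤ i then i
  else
    -- rest = text[i+1:]; "\n" in rest / rest.index("\n")
    match PySem.List.index? (PySem.List.slice text (some (i + 1)) none) "\n" with
    | some k => (i + 1 + (k : Int)) + 1
    | none   => n

-- ===== PRECONDITION & SPEC =====
-- Pre_ excludes negative start indices: there A's text[i] either raises IndexError
-- (i < -len(text)) or silently wraps around to the end of the list and re-reads
-- elements, an accident of Python's negative indexing no caller of this cursor
-- function intends; B's slice-based code treats negative i differently.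
def Pre_write_text (dests : List String) (text : List String) (i : Int) : Prop := 0 ≤ i
instance (dests : List String) (text : List String) (i : Int) : Decidable (Pre_write_text dests text i) := by unfold Pre_write_text; infer_instance
def pvWitness_write_text : List String × List String × Int := ([], ["a", "\n", "b"], 0)

def Spec_write_text (dests : List String) (text : List String) (i : Int) (out : Int) : Prop := out = write_text_alt dests text i
instance (dests : List String) (text : List String) (i : Int) (out : Int) : Decidable (Spec_write_text dests text i out) := by unfold Spec_write_text; infer_instance

-- ===== CLAIM (what is proved, stated in full; the proofs are below) =====
def Claim_equal_write_text : Prop := ∀ (dests : List String) (text : List String) (i : Int), Dom_write_text dests text i → Pre_write_text dests text i → Spec_write_text dests text i (write_text dests text i)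

-- ===== LEMMAS AND PROOFS =====
lemma write_text_go_eq_alt (dests : List String) (text : List String) :
    ∀ (k : Nat) (i : Int), 0 ≤ i → text.length ≤ i.toNat + k →
      write_text_go text (text.length : Int) i = write_text_alt dests text i := by
  intro k
  induction k with
  | zero =>
    intro i hi hk
    rw [write_text_go, dif_neg (by omega)]
    unfold write_text_alt
    rw [if_pos (by omega)]
  | succ k ih =>
    intro i hi hk
    by_cases hlt : i < (text.length : Int)
    · rw [write_text_go, dif_pos hlt]
      have h0 : (0:Int) ≤ i + 1 := by omega
      have hrest : PySem.List.slice text (some (i + 1)) none = text.drop (i + 1).toNat :=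
        PySem.List.slice_from text h0
      by_cases hn : i + 1 < (text.length : Int)
      · have hlen : (i + 1).toNat < text.length := by omega
        have hgets : PySem.List.pyGet? text (i + 1) = text[(i + 1).toNat]? :=
          PySem.List.pyGet?_of_nonneg text h0
        have hdrop : text.drop (i + 1).toNat = text[(i + 1).toNat] :: text.drop ((i + 1).toNat + 1) :=
          List.drop_eq_getElem_cons hlen
        by_cases hnl : text[(i + 1).toNat] = "\n"
        · -- next element is a newline: break, return i + 2
          rw [if_pos ⟨hn, by rw [hgets, List.getElem?_eq_getElem hlen, hnl]⟩]
          unfold write_text_alt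
          rw [if_neg (by omega), hrest, hdrop, hnl, PySem.List.index?_cons_self]
          simp
        · -- next element is not a newline: keep looping
          rw [if_neg (by
            rintro ⟨-, hq⟩
            rw [hgets, List.getElem?_eq_getElem hlen] at hq
            exact hnl (Option.some.injEq _ _ ▸ hq))]
          rw [ih (i + 1) h0 (by omega)]
          -- relate alt at i with alt at i + 1
          unfold write_text_alt
          rw [if_neg (by omega), if_neg (by omega), hrest, hdrop,
            PySem.List.index?_cons_of_ne _ hnl]
          have hrest' : PySem.List.slice text (some (i + 1 + 1)) none = text.drop ((i + 1).toNat + 1) := by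
            rw [PySem.List.slice_from text (by omega)]
            congr 1
            omega
          rw [hrest']
          rcases PySem.List.index? (text.drop ((i + 1).toNat + 1)) "\n" with _ | m
          · simp
          · simp
            omega
      · -- i + 1 reached the end of text: the loop exits on the next test
        rw [if_neg (by rintro ⟨h1, -⟩; omega)]
        rw [ih (i + 1) h0 (by omega)]
        unfold write_text_alt
        rw [if_pos (by omega), if_neg (by omega), hrest]
        have : text.drop (i + 1).toNat = [] := List.drop_eq_nil_of_le (by omega)
        rw [this]
        simp
        omega
    · rw [write_text_go, dif_neg hlt]
      unfold write_text_alt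
      rw [if_pos (by omega)]

-- ===== VERDICT (by name: the statement is the Claim_ definition above) =====
theorem write_text_spec : Claim_equal_write_text := by
  intro dests text i _ hpre
  unfold Spec_write_text write_text
  exact write_text_go_eq_alt dests text text.length i hpre (by omega)
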